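-- pv_equiv track=rewrite | github.com/Sharvay/Job-tracker-agent | utils/content_cleaner.py | clean_indeed_content
-- ===== SOURCE A (Python) =====
-- def clean_indeed_content(content: str) -> str:
--     """
--     Clean Indeed-specific content
--     """
--     cutoff_phrases = [
--         "Report job",
--         "Not interested",
--         "People also searched",
--         "Jobs you might be interested in"
--     ]
--
--     earliest_index = len(content)
--     found_phrase = None
--
--     for phrase in cutoff_phrases:
--         index = content.find(phrase)
--         if index != -1 and index < earliest_index:
--             earliest_index = index
--             found_phrase = phrase
--
--     if found_phrase:
--         content = content[:earliest_index]
--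
--     return content.strip()
-- ===== SOURCE B (Python) =====
-- def clean_indeed_content(content: str) -> str:
--     """
--     Clean Indeed-specific content
--     """
--     cutoff_phrases = (
--         "Report job",
--         "Not interested",
--         "People also searched",
--         "Jobs you might be interested in",
--     )
--     for i in range(len(content)):
--         if any(content.startswith(p, i) for p in cutoff_phrases):
--             return content[:i].strip()
--     return content.strip()
-- ===== Notes on version B (the rewrite author's own statement) =====
-- stated objective: alternative
-- what changed: A runs a separate str.find pass per cutoff phrase and keeps a running minimum index; B makes one left-to-right scan over the content and truncates at the first position where any cutoff phrase starts (str.startswith), returning early.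
import Mathlib
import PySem

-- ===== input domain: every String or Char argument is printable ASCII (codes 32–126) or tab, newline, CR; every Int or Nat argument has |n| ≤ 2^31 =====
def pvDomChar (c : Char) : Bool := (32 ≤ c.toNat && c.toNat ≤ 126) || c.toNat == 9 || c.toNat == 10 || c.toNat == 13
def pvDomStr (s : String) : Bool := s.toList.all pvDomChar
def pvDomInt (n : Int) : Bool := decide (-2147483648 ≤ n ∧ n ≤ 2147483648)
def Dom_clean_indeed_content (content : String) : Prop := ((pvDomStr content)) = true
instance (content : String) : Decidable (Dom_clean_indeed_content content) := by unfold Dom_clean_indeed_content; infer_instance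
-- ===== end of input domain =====

-- B replaces A's four per-phrase `find` passes plus running minimum by ONE left-to-right scan
-- that stops at the first position where any cutoff phrase starts (objective: alternative).

-- ===== PORT A =====
-- the literal cutoff_phrases list of A
def pvCutoffPhrases : List String :=
  ["Report job", "Not interested", "People also searched", "Jobs you might be interested in"]

def clean_indeed_content (content : String) : String :=
  -- the for-loop over cutoff_phrases with state (earliest_index, found_phrase)
  let st := pvCutoffPhrases.foldl
    (fun (st : Int × Option String) phrase =>
      let index := PySem.Str.find content phrase
      if index ≠ -1 ∧ index < st.1 then (index, some phrase) else st)
    (PySem.Str.len content, (none : Option String))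
  -- `if found_phrase:` — found_phrase is None or one of the (nonempty) phrases, so truthiness = isSome
  let content := if st.2.isSome then PySem.Str.slice content none (some st.1) else content
  PySem.Str.strip content

-- ===== PORT B =====
def pvPhrasesB : List (List Char) :=
  ["Report job".toList, "Not interested".toList, "People also searched".toList,
   "Jobs you might be interested in".toList]

-- the scan `for i in range(len(content)): if any(content.startswith(p, i) ...): return content[:i]...`
def pvCutB : List Char → List Char
  | [] => []
  | c :: rest =>
    if pvPhrasesB.any (fun p => PySem.Chars.startswith (c :: rest) p) then []
    else c :: pvCutB rest

def clean_indeed_content_alt (content : String) : String :=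
  PySem.Str.strip (String.ofList (pvCutB content.toList))

-- ===== PRECONDITION & SPEC =====
def Spec_clean_indeed_content (content : String) (out : String) : Prop := out = clean_indeed_content_alt content
instance (content : String) (out : String) : Decidable (Spec_clean_indeed_content content out) := by unfold Spec_clean_indeed_content; infer_instance

-- ===== CLAIM (what is proved, stated in full; the proofs are below) =====
def Claim_equal_clean_indeed_content : Prop := ∀ (content : String), Dom_clean_indeed_content content → Spec_clean_indeed_content content (clean_indeed_content content)

-- ===== LEMMAS AND PROOFS =====

-- characterisation of A's fold: the result is a lower bound of all successful finds, and is
-- either the untouched start state or the find of some phrase of the list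
theorem foldA_spec (c : String) (Q : List String) (e : Int) (f : Option String) :
    (Q.foldl
      (fun (st : Int × Option String) phrase =>
        let index := PySem.Str.find c phrase
        if index ≠ -1 ∧ index < st.1 then (index, some phrase) else st)
      (e, f)).1 ≤ e ∧
    ((Q.foldl
      (fun (st : Int × Option String) phrase =>
        let index := PySem.Str.find c phrase
        if index ≠ -1 ∧ index < st.1 then (index, some phrase) else st)
      (e, f)) = (e, f) ∨
      ∃ p ∈ Q, (Q.foldl
      (fun (st : Int × Option String) phrase =>
        let index := PySem.Str.find c phrase
        if index ≠ -1 ∧ index < st.1 then (index, some phrase) else st)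
      (e, f)).2 = some p ∧ (Q.foldl
      (fun (st : Int × Option String) phrase =>
        let index := PySem.Str.find c phrase
        if index ≠ -1 ∧ index < st.1 then (index, some phrase) else st)
      (e, f)).1 = PySem.Str.find c p ∧ PySem.Str.find c p ≠ -1 ∧ (Q.foldl
      (fun (st : Int × Option String) phrase =>
        let index := PySem.Str.find c phrase
        if index ≠ -1 ∧ index < st.1 then (index, some phrase) else st)
      (e, f)).1 < e) ∧
    (∀ p ∈ Q, PySem.Str.find c p ≠ -1 → (Q.foldl
      (fun (st : Int × Option String) phrase =>
        let index := PySem.Str.find c phrase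
        if index ≠ -1 ∧ index < st.1 then (index, some phrase) else st)
      (e, f)).1 ≤ PySem.Str.find c p) := by
  induction Q generalizing e f with
  | nil => simp
  | cons p Q ih =>
    simp only [List.foldl_cons]
    by_cases h : PySem.Str.find c p ≠ -1 ∧ PySem.Str.find c p < e
    · simp only [if_pos h]
      obtain ⟨h1, h2, h3⟩ := ih (PySem.Str.find c p) (some p)
      refine ⟨(lt_of_le_of_lt h1 h.2).le, ?_, ?_⟩
      · rcases h2 with heq | ⟨q, hq, hl⟩
        · exact Or.inr ⟨p, by simp, by rw [heq], by rw [heq], h.1, by rw [heq]; exact h.2⟩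
        · exact Or.inr ⟨q, by simp [hq], hl.1, hl.2.1, hl.2.2.1, lt_of_le_of_lt (hl.2.1 ▸ h1) h.2⟩
      · intro q hq hfq
        rcases List.mem_cons.mp hq with rfl | hq
        · exact h1
        · exact h3 q hq hfq
    · simp only [if_neg h]
      obtain ⟨h1, h2, h3⟩ := ih e f
      refine ⟨h1, ?_, ?_⟩
      · rcases h2 with heq | ⟨q, hq, hl⟩
        · exact Or.inl heq
        · exact Or.inr ⟨q, List.mem_cons_of_mem _ hq, hl⟩
      · intro q hq hfq
        rcases List.mem_cons.mp hq with rfl | hq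
        · push Not at h
          exact le_trans h1 (h hfq)
        · exact h3 q hq hfq

-- when no phrase occurs, A's fold leaves the start state unchanged
theorem foldA_none (c : String) (Q : List String) (e : Int) (f : Option String)
    (h : ∀ p ∈ Q, PySem.Str.find c p = -1) :
    (Q.foldl
      (fun (st : Int × Option String) phrase =>
        let index := PySem.Str.find c phrase
        if index ≠ -1 ∧ index < st.1 then (index, some phrase) else st)
      (e, f)) = (e, f) := by
  induction Q generalizing e f with
  | nil => rfl
  | cons p Q ih =>
    have hp : PySem.Str.find c p = -1 := h p (by simp)
    simp only [List.foldl_cons, hp]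
    rw [if_neg (by simp)]
    exact ih e f fun q hq => h q (List.mem_cons_of_mem _ hq)

theorem pvPhrasesB_eq : pvPhrasesB = pvCutoffPhrases.map String.toList := by decide

theorem pvCutoffPhrases_ne_nil : ∀ p ∈ pvCutoffPhrases, p.toList ≠ [] := by decide

-- B's scan leaves the string unchanged when no phrase occurs anywhere
theorem cutB_of_no_infix (s : List Char) (h : ∀ p ∈ pvPhrasesB, ¬ p <:+: s) :
    pvCutB s = s := by
  induction s with
  | nil => rfl
  | cons c rest ih =>
    rw [pvCutB]
    rw [if_neg, ih]
    · intro p hp hinf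
      exact h p hp (hinf.trans (List.suffix_cons c rest).isInfix)
    · simp only [List.any_eq_true, not_exists, not_and]
      intro p hp hsw
      exact h p hp ((PySem.Chars.startswith_iff _ _).mp hsw).isInfix

-- B's scan truncates exactly at the first position where some phrase starts
theorem cutB_take (m : Nat) (s : List Char)
    (hbefore : ∀ j < m, ∀ p ∈ pvPhrasesB, ¬ p <+: s.drop j)
    (hat : ∃ p ∈ pvPhrasesB, p <+: s.drop m) :
    pvCutB s = s.take m := by
  induction m generalizing s with
  | zero =>
    obtain ⟨p, hp, hpre⟩ := hat
    have hpne : p ≠ [] := by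
      rw [pvPhrasesB_eq] at hp
      obtain ⟨q, hq, rfl⟩ := List.mem_map.mp hp
      exact pvCutoffPhrases_ne_nil q hq
    simp only [List.drop_zero] at hpre
    cases s with
    | nil => exact absurd (List.prefix_nil.mp hpre) hpne
    | cons c rest =>
      rw [pvCutB, if_pos]
      · simp
      · simp only [List.any_eq_true]
        exact ⟨p, hp, (PySem.Chars.startswith_iff _ _).mpr hpre⟩
  | succ m ih =>
    cases s with
    | nil =>
      obtain ⟨p, hp, hpre⟩ := hat
      simp only [List.drop_nil] at hpre
      have hpne : p ≠ [] := by
        rw [pvPhrasesB_eq] at hp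
        obtain ⟨q, hq, rfl⟩ := List.mem_map.mp hp
        exact pvCutoffPhrases_ne_nil q hq
      exact absurd (List.prefix_nil.mp hpre) hpne
    | cons c rest =>
      rw [pvCutB, if_neg]
      · rw [List.take_succ_cons, ih rest]
        · intro j hj p hp
          exact hbefore (j + 1) (by omega) p hp
        · obtain ⟨p, hp, hpre⟩ := hat
          exact ⟨p, hp, hpre⟩
      · simp only [List.any_eq_true, not_exists, not_and]
        intro p hp hsw
        exact hbefore 0 (by omega) p hp (by simpa using (PySem.Chars.startswith_iff _ _).mp hsw)

-- ===== VERDICT (by name: the statement is the Claim_ definition above) =====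
theorem clean_indeed_content_spec : Claim_equal_clean_indeed_content := by
  intro content _
  unfold Spec_clean_indeed_content
  show clean_indeed_content content = clean_indeed_content_alt content
  simp only [clean_indeed_content, clean_indeed_content_alt]
  by_cases hocc : ∃ p ∈ pvCutoffPhrases, PySem.Str.find content p ≠ -1
  · -- some phrase occurs: A truncates at the minimum find, B at the first matching position
    obtain ⟨h1, h2, h3⟩ := foldA_spec content pvCutoffPhrases (PySem.Str.len content) none
    set s := content.toList with hs
    set r := pvCutoffPhrases.foldl
      (fun (st : Int × Option String) phrase =>
        let index := PySem.Str.find content phrase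
        if index ≠ -1 ∧ index < st.1 then (index, some phrase) else st)
      (PySem.Str.len content, (none : Option String)) with hr
    -- each occurring phrase has find < len (phrases are nonempty)
    have hlt : ∀ p ∈ pvCutoffPhrases, PySem.Str.find content p ≠ -1 →
        PySem.Str.find content p < PySem.Str.len content := by
      intro p hp hf
      rw [PySem.Str.find_eq, ← hs] at hf
      have h0 : 0 ≤ PySem.Chars.find s p.toList := by
        have := PySem.Chars.neg_one_le_find (s := s) (sub := p.toList)
        omega
      obtain ⟨hpre, _⟩ := PySem.Chars.find_spec h0
      have hdne : p.toList.length ≤ (s.drop (PySem.Chars.find s p.toList).toNat).length :=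
        hpre.length_le
      have hplen : 0 < p.toList.length :=
        List.length_pos_iff.mpr (pvCutoffPhrases_ne_nil p hp)
      rw [List.length_drop] at hdne
      rw [PySem.Str.find_eq, PySem.Str.len_eq, ← hs]
      omega
    -- the untouched-state disjunct is impossible
    rcases h2 with heq | ⟨p₀, hp₀, hsome, hfind, hfne, _⟩
    · exfalso
      obtain ⟨p, hp, hf⟩ := hocc
      have := h3 p hp hf
      rw [heq] at this
      exact absurd (lt_of_le_of_lt this (hlt p hp hf)) (lt_irrefl _)
    · rw [if_pos (by rw [hsome]; rfl)]
      have h0 : 0 ≤ r.1 := by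
        rw [hfind, PySem.Str.find_eq, ← hs]
        rw [PySem.Str.find_eq, ← hs] at hfne
        have := PySem.Chars.neg_one_le_find (s := s) (sub := p₀.toList)
        omega
      -- B truncates at the same position
      have hcut : pvCutB s = s.take r.1.toNat := by
        apply cutB_take
        · intro j hj p hp hpre
          rw [pvPhrasesB_eq] at hp
          obtain ⟨q, hq, rfl⟩ := List.mem_map.mp hp
          have hfq : PySem.Str.find content q ≠ -1 := by
            rw [PySem.Str.find_eq, ← hs, Ne, PySem.Chars.find_eq_neg_one_iff]
            intro hni
            exact hni (hpre.isInfix.trans (List.drop_suffix j s).isInfix)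
          have hle := h3 q hq hfq
          rw [PySem.Str.find_eq, ← hs] at hfq hle
          have h0q : 0 ≤ PySem.Chars.find s q.toList := by
            have := PySem.Chars.neg_one_le_find (s := s) (sub := q.toList)
            omega
          obtain ⟨_, hmin⟩ := PySem.Chars.find_spec h0q
          have hjge : (PySem.Chars.find s q.toList).toNat ≤ j := by
            by_contra hcon
            exact hmin j (by omega) hpre
          omega
        · rw [hfind, PySem.Str.find_eq, ← hs] at h0 ⊢
          obtain ⟨hpre, _⟩ := PySem.Chars.find_spec h0
          exact ⟨p₀.toList, by rw [pvPhrasesB_eq]; exact List.mem_map.mpr ⟨p₀, hp₀, rfl⟩, hpre⟩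
      apply String.toList_inj.mp
      rw [PySem.Str.toList_strip, PySem.Str.toList_strip, PySem.Str.toList_slice,
        PySem.Chars.slice_eq_listSlice, PySem.List.slice_to _ h0, String.toList_ofList,
        ← hs, hcut]
  · -- no phrase occurs: both sides return content.strip()
    push Not at hocc
    rw [foldA_none content pvCutoffPhrases _ _ hocc]
    rw [if_neg (by simp)]
    apply String.toList_inj.mp
    rw [PySem.Str.toList_strip, PySem.Str.toList_strip, String.toList_ofList,
      cutB_of_no_infix content.toList ?_]
    intro p hp hinf
    rw [pvPhrasesB_eq] at hp
    obtain ⟨q, hq, rfl⟩ := List.mem_map.mp hp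
    have := hocc q hq
    rw [PySem.Str.find_eq, PySem.Chars.find_eq_neg_one_iff] at this
    exact this hinf
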